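-- pv_equiv track=rewrite | github.com/Abdelkaderboutaba/master-2-computer-vision | theorie-des-jeux/tp1/tp1.py | strategie_dominante_joueur2
-- ===== SOURCE A (Python) =====
-- def strategie_dominante_joueur2(jeu):
--     for j in range(len(jeu[0])):  # Parcourt les stratégies du joueur 2
--         dominante = True
--         for k in range(len(jeu[0])):  # Compare avec les autres stratégies
--             if j == k:
--                 continue
--             for l in range(len(jeu)):  # Pour chaque stratégie du joueur 1
--                 if jeu[l][j][1] < jeu[l][k][1]:
--                     dominante = False
--                     break
--             if not dominante:
--                 break
--         if dominante:
--             return j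
--     return None
-- ===== SOURCE B (Python) =====
-- def strategie_dominante_joueur2(jeu):
--     # Row-major single pass: keep the set of columns that are a row-maximum
--     # (in player 2's payoff, over the n = len(jeu[0]) columns of the game)
--     # in every row seen so far; the dominant strategy is the smallest survivor.
--     n = len(jeu[0])
--     candidates = set(range(n))
--     for row in jeu:
--         if not candidates:
--             break
--         m = max(p[1] for p in row[:n])
--         candidates = {j for j in candidates if row[j][1] == m}
--     return min(candidates) if candidates else None
-- ===== Notes on version B (the rewrite author's own statement) =====
-- stated objective: faster
-- what changed: Replaces A's column-major triple loop (each column compared against every other column over all rows) by a single row-major pass that keeps the set of columns achieving the row maximum in every row seen so far and returns the smallest survivor.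
-- outside the precondition, e.g. on strategie_dominante_joueur2([[(0, 1)], []]): A returns 0, B raises ValueError; on strategie_dominante_joueur2([[(0, 1), (0, 0), (0, 0)], [(0, 0), (0, 1)]]): A returns None, B returns None
import Mathlib
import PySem

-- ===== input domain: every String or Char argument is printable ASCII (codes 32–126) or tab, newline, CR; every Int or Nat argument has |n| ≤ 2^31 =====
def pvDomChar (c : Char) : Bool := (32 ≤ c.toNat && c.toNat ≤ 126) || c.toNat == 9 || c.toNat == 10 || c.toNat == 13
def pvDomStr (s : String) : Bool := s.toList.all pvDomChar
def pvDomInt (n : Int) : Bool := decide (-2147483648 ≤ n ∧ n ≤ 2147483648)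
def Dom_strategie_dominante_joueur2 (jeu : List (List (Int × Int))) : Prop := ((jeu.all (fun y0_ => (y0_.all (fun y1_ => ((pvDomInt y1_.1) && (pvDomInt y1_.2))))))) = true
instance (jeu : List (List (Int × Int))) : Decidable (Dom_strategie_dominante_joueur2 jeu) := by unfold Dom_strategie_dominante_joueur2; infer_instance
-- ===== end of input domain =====

-- B replaces A's column-major triple loop by one row-major pass intersecting the
-- per-row argmax column sets (asymptotically faster, O(m*n) vs O(m*n^2)).

-- ===== PORT A =====
-- jeu[l][j][1]; an out-of-range index (a Python IndexError) is excluded by Pre_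
def pvPay (row : List (Int × Int)) (j : Nat) : Int := (row.getD j (0, 0)).2

-- the innermost 'for l in range(len(jeu))' loop: dominante stays True unless some row breaks it
def pvA_l (j k : Nat) : List (List (Int × Int)) → Bool
  | [] => true
  | row :: rest => if pvPay row j < pvPay row k then false else pvA_l j k rest

-- the 'for k in range(len(jeu[0]))' loop with the 'continue' and the early break
def pvA_k (jeu : List (List (Int × Int))) (j : Nat) : List Nat → Bool
  | [] => true
  | k :: ks =>
      if j = k then pvA_k jeu j ks
      else if pvA_l j k jeu then pvA_k jeu j ks else false

-- the outer 'for j in range(len(jeu[0]))' loop with the early return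
def pvA_j (jeu : List (List (Int × Int))) : List Nat → Option Int
  | [] => none
  | j :: js =>
      if pvA_k jeu j (List.range (jeu.headD []).length) then some (Int.ofNat j)
      else pvA_j jeu js

def strategie_dominante_joueur2 (jeu : List (List (Int × Int))) : Option Int :=
  pvA_j jeu (List.range (jeu.headD []).length)

-- ===== PORT B =====
-- max(p[1] for p in row[:n]); an empty generator (Python ValueError) is excluded by Pre_
def pvRowMax (row : List (Int × Int)) (n : Nat) : Int :=
  (PySem.List.max? ((List.take n row).map Prod.snd) (fun x => x)).getD 0

-- 'for row in jeu' with the early break; candidates kept as the distinct sorted survivors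
def pvB_loop (n : Nat) (cands : List Nat) : List (List (Int × Int)) → List Nat
  | [] => cands
  | row :: rest =>
      if cands.isEmpty then cands
      else pvB_loop n (cands.filter (fun j => pvPay row j == pvRowMax row n)) rest

def strategie_dominante_joueur2_alt (jeu : List (List (Int × Int))) : Option Int :=
  let n := (jeu.headD []).length
  let cands := pvB_loop n (List.range n) jeu
  (PySem.List.min? cands (fun x => x)).map Int.ofNat

-- ===== PRECONDITION & SPEC =====
-- Pre_ excludes the empty list (A raises IndexError on jeu[0]) and ragged matrices with a
-- row shorter than the first: there A usually raises IndexError, and when its early breaks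
-- happen to dodge the missing entries its value is an accident of the break order.
def Pre_strategie_dominante_joueur2 (jeu : List (List (Int × Int))) : Prop :=
  jeu ≠ [] ∧ ∀ row ∈ jeu, (jeu.headD []).length ≤ row.length
instance (jeu : List (List (Int × Int))) : Decidable (Pre_strategie_dominante_joueur2 jeu) := by
  unfold Pre_strategie_dominante_joueur2; infer_instance

def pvWitness_strategie_dominante_joueur2 : (List (List (Int × Int))) :=
  [[(1, 2), (3, 1)], [(0, 2), (2, 0)]]

def Spec_strategie_dominante_joueur2 (jeu : List (List (Int × Int))) (out : Option Int) : Prop := out = strategie_dominante_joueur2_alt jeu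
instance (jeu : List (List (Int × Int))) (out : Option Int) : Decidable (Spec_strategie_dominante_joueur2 jeu out) := by unfold Spec_strategie_dominante_joueur2; infer_instance

-- ===== CLAIM (what is proved, stated in full; the proofs are below) =====
def Claim_equal_strategie_dominante_joueur2 : Prop := ∀ (jeu : List (List (Int × Int))), Dom_strategie_dominante_joueur2 jeu → Pre_strategie_dominante_joueur2 jeu → Spec_strategie_dominante_joueur2 jeu (strategie_dominante_joueur2 jeu)

-- ===== LEMMAS AND PROOFS =====

lemma pvA_l_iff (j k : Nat) (jeu : List (List (Int × Int))) :
    pvA_l j k jeu = true ↔ ∀ row ∈ jeu, pvPay row k ≤ pvPay row j := by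
  induction jeu with
  | nil => simp [pvA_l]
  | cons row rest ih =>
      by_cases h : pvPay row j < pvPay row k
      · simp only [pvA_l, if_pos h]
        constructor
        · intro hf; exact absurd hf (by simp)
        · intro hall
          exact absurd (hall row List.mem_cons_self) (not_le.mpr h)
      · simp only [pvA_l, if_neg h, ih, List.mem_cons]
        constructor
        · rintro hr r (rfl | hr'); · exact not_lt.mp h
          exact hr r hr'
        · intro hall r hr; exact hall r (Or.inr hr)

lemma pvA_k_iff (jeu : List (List (Int × Int))) (j : Nat) (ks : List Nat) :
    pvA_k jeu j ks = true ↔ ∀ k ∈ ks, j ≠ k → pvA_l j k jeu = true := by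
  induction ks with
  | nil => simp [pvA_k]
  | cons k ks ih =>
      by_cases hjk : j = k
      · simp only [pvA_k, if_pos hjk, ih, List.mem_cons]
        constructor
        · rintro hr k' (rfl | hk') hne; · exact absurd hjk hne
          exact hr k' hk' hne
        · intro hall k' hk' hne; exact hall k' (Or.inr hk') hne
      · by_cases hl : pvA_l j k jeu = true
        · simp only [pvA_k, if_neg hjk, if_pos hl, ih, List.mem_cons]
          constructor
          · rintro hr k' (rfl | hk') hne; · exact hl
            exact hr k' hk' hne
          · intro hall k' hk' hne; exact hall k' (Or.inr hk') hne
        · simp only [pvA_k, if_neg hjk, if_neg hl]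
          constructor
          · intro hf; exact absurd hf (by simp)
          · intro hall
            exact absurd (hall k List.mem_cons_self hjk) hl

lemma pvA_j_eq (jeu : List (List (Int × Int))) (js : List Nat) :
    pvA_j jeu js
      = (js.find? (fun j => pvA_k jeu j (List.range (jeu.headD []).length))).map Int.ofNat := by
  induction js with
  | nil => simp [pvA_j]
  | cons j js ih =>
      simp only [pvA_j]
      by_cases h : pvA_k jeu j (List.range (jeu.headD []).length) = true
      · rw [if_pos h,
          List.find?_cons_of_pos (p := fun j => pvA_k jeu j (List.range (jeu.headD []).length)) h]
        rfl
      · rw [if_neg h,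
          List.find?_cons_of_neg (p := fun j => pvA_k jeu j (List.range (jeu.headD []).length)) h, ih]

lemma pvB_loop_eq (n : Nat) (rows : List (List (Int × Int))) :
    ∀ cands : List Nat,
      pvB_loop n cands rows
        = cands.filter (fun j => rows.all (fun row => pvPay row j == pvRowMax row n)) := by
  induction rows with
  | nil => intro cands; simp [pvB_loop]
  | cons row rest ih =>
      intro cands
      by_cases h : cands.isEmpty
      · rw [List.isEmpty_iff] at h
        simp [pvB_loop, h]
      · rw [pvB_loop, if_neg (by simpa using h), ih, List.filter_filter]
        exact List.filter_congr fun a _ => by rw [List.all_cons, Bool.and_comm]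

lemma foldl_min_of_le (t : List Nat) : ∀ x : Nat, (∀ y ∈ t, x ≤ y) → t.foldl min x = x := by
  induction t with
  | nil => intro x _; rfl
  | cons y t ih =>
      intro x h
      have hxy : min x y = x := min_eq_left (h y List.mem_cons_self)
      simp only [List.foldl_cons, hxy]
      exact ih x fun z hz => h z (List.mem_cons_of_mem _ hz)

lemma min?_id_of_pairwise (l : List Nat) (h : l.Pairwise (· < ·)) :
    PySem.List.min? l (fun x => x) = l.head? := by
  cases l with
  | nil => simp [PySem.List.min?]
  | cons x t =>
      rw [PySem.List.min?_id_cons, List.head?_cons]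
      have hx : ∀ y ∈ t, x ≤ y := fun y hy => le_of_lt ((List.pairwise_cons.mp h).1 y hy)
      rw [foldl_min_of_le t x hx]

lemma find?_eq_head?_filter {α : Type} (p : α → Bool) (l : List α) :
    l.find? p = (l.filter p).head? := by
  induction l with
  | nil => rfl
  | cons x t ih =>
      by_cases h : p x
      · rw [List.find?_cons_of_pos h, List.filter_cons, if_pos h, List.head?_cons]
      · rw [List.find?_cons_of_neg h, List.filter_cons, if_neg h, ih]

lemma find?_congr_mem {α : Type} (p q : α → Bool) (l : List α)
    (h : ∀ a ∈ l, p a = q a) : l.find? p = l.find? q := by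
  induction l with
  | nil => rfl
  | cons x t ih =>
      have hx := h x List.mem_cons_self
      by_cases hp : p x
      · rw [List.find?_cons_of_pos hp, List.find?_cons_of_pos (hx ▸ hp)]
      · rw [List.find?_cons_of_neg hp, List.find?_cons_of_neg (hx ▸ hp)]
        exact ih fun a ha => h a (List.mem_cons_of_mem _ ha)

-- the per-row core: column j carries the row maximum iff it weakly beats every column k < n
lemma row_core (row : List (Int × Int)) (n j : Nat) (hn : n ≤ row.length) (hj : j < n) :
    (∀ k, k < n → pvPay row k ≤ pvPay row j) ↔ pvPay row j = pvRowMax row n := by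
  set L := (List.take n row).map Prod.snd with hL
  have hlen : (List.take n row).length = n := by simp [List.length_take, Nat.min_eq_left hn]
  have hmem : ∀ k, k < n → pvPay row k ∈ L := by
    intro k hk
    have hk' : k < row.length := lt_of_lt_of_le hk hn
    have hkt : k < (List.take n row).length := by omega
    have hpk : pvPay row k = ((List.take n row)[k]'hkt).2 := by
      rw [pvPay, List.getD_eq_getElem _ _ hk']
      congr 1
      exact List.getElem_take.symm
    rw [hpk, hL]
    exact List.mem_map.mpr ⟨_, List.getElem_mem _, rfl⟩
  have hmem' : ∀ x ∈ L, ∃ k, k < n ∧ x = pvPay row k := by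
    intro x hx
    obtain ⟨y, hy, rfl⟩ := List.mem_map.mp hx
    obtain ⟨i, hi, rfl⟩ := List.mem_iff_getElem.mp hy
    have hi' : i < n := by omega
    have hi'' : i < row.length := lt_of_lt_of_le hi' hn
    refine ⟨i, hi', ?_⟩
    rw [pvPay, List.getD_eq_getElem _ _ hi'']
    congr 1
    exact List.getElem_take
  have hne : L ≠ [] := by
    intro habs
    have := hmem j hj
    simp [habs] at this
  obtain ⟨m, hm⟩ : ∃ m, PySem.List.max? L (fun x => x) = some m := by
    cases hmax : PySem.List.max? L (fun x => x) with
    | none => exact absurd ((PySem.List.max?_eq_none_iff L (fun x => x)).mp hmax) hne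
    | some m => exact ⟨m, rfl⟩
  have hmval : pvRowMax row n = m := by rw [pvRowMax, ← hL, hm]; rfl
  have hmmem : m ∈ L := PySem.List.max?_mem hm
  have hmle : ∀ x ∈ L, x ≤ m := fun x hx => PySem.List.max?_isMax hm x hx
  constructor
  · intro hall
    obtain ⟨k, hk, rfl⟩ := hmem' m hmmem
    exact hmval ▸ le_antisymm (hmle _ (hmem j hj)) (hall k hk)
  · intro heq k hk
    exact heq ▸ hmval ▸ hmle _ (hmem k hk)

lemma pred_eq (jeu : List (List (Int × Int)))
    (hpre : ∀ row ∈ jeu, (jeu.headD []).length ≤ row.length)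
    (j : Nat) (hj : j < (jeu.headD []).length) :
    pvA_k jeu j (List.range (jeu.headD []).length)
      = jeu.all (fun row => pvPay row j == pvRowMax row (jeu.headD []).length) := by
  set n := (jeu.headD []).length with hn
  rw [Bool.eq_iff_iff, pvA_k_iff, List.all_eq_true]
  constructor
  · intro h row hrow
    rw [beq_iff_eq, ← row_core row n j (hpre row hrow) hj]
    intro k hk
    by_cases hjk : j = k
    · exact hjk ▸ le_refl _
    · exact (pvA_l_iff j k jeu).mp (h k (List.mem_range.mpr hk) hjk) row hrow
  · intro h k hk _
    rw [pvA_l_iff]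
    intro row hrow
    exact (row_core row n j (hpre row hrow) hj).mpr
      (beq_iff_eq.mp (h row hrow)) k (List.mem_range.mp hk)

-- ===== VERDICT (by name: the statement is the Claim_ definition above) =====
theorem strategie_dominante_joueur2_spec : Claim_equal_strategie_dominante_joueur2 := by
  intro jeu _ hpre
  unfold Spec_strategie_dominante_joueur2
  obtain ⟨_, hlen⟩ := hpre
  set n := (jeu.headD []).length with hn
  rw [strategie_dominante_joueur2, strategie_dominante_joueur2_alt, pvA_j_eq, pvB_loop_eq]
  rw [min?_id_of_pairwise _ ((List.pairwise_lt_range).filter _), ← find?_eq_head?_filter]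
  congr 1
  exact find?_congr_mem _ _ _ fun j hj => pred_eq jeu hlen j (List.mem_range.mp hj)
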